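-- pv_equiv track=rewrite | github.com/Andris-Huang/Hog-Strategy | hog.py | more_boar
-- ===== SOURCE A (Python) =====
-- def more_boar(player_score, opponent_score):
--     """Return whether the player gets an extra turn.
--
--     player_score:   The total score of the current player.
--     opponent_score: The total score of the other player.
--
--     >>> more_boar(21, 43)
--     True
--     >>> more_boar(22, 43)
--     True
--     >>> more_boar(43, 21)
--     False
--     >>> more_boar(12, 12)
--     False
--     >>> more_boar(7, 8)
--     False
--     """
--     # BEGIN PROBLEM 4
--     "*** YOUR CODE HERE ***"
--     def comparison(a):
--         while a > 99:
--             a = a // 10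
--         return a
--     b = comparison(player_score)
--     c = comparison(opponent_score)
--     return (b // 10) < (c // 10) and (b % 10) < (c % 10)
-- ===== SOURCE B (Python) =====
-- def more_boar(player_score, opponent_score):
--     """Return whether the player gets an extra turn.
--
--     Instead of reducing a score with a //10 loop and then splitting the
--     result, read the tens and ones digits of the leading two digits
--     directly off the score's decimal string (scores <= 99 are split
--     arithmetically, which also covers negatives unchanged, as in the rules).
--     """
--     def lead_digits(a):
--         if a > 99:
--             s = str(a)
--             return ord(s[0]) - 48, ord(s[1]) - 48
--         return a // 10, a % 10
--     pt, pu = lead_digits(player_score)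
--     ot, ou = lead_digits(opponent_score)
--     return pt < ot and pu < ou
-- ===== Notes on version B (the rewrite author's own statement) =====
-- stated objective: alternative
-- what changed: Replaces A's repeated a //= 10 reduction loop (followed by //10 and %10 splitting) with a helper that reads the tens and ones digits of the leading two digits straight off the score's decimal string via ord(s[0])-48 and ord(s[1])-48, returning a digit pair per score.
import Mathlib
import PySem

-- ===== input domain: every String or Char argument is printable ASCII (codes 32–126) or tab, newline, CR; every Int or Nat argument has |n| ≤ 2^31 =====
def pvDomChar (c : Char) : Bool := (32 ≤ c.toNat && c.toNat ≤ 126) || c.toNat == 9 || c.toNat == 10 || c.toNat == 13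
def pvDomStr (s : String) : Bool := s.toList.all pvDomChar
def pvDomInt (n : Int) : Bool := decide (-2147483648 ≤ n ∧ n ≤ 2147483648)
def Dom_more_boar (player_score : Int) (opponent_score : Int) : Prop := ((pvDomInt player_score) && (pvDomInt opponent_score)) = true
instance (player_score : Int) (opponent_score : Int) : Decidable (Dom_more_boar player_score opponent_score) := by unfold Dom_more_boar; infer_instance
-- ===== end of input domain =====

-- B replaces A's //10 reduction loop + digit splitting by reading the two
-- leading digits off the score's decimal string (alternative decomposition, same cost).

-- ===== PORT A =====
-- A's inner helper: while a > 99: a = a // 10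
def comparison (a : Int) : Int :=
  if a > 99 then comparison (PySem.Int.floordiv a 10) else a
termination_by a.toNat
decreasing_by
  rw [PySem.Int.floordiv_eq_ediv_of_pos (by norm_num : (0:Int) < 10)]
  omega

def more_boar (player_score : Int) (opponent_score : Int) : Bool :=
  let b := comparison player_score
  let c := comparison opponent_score
  decide (PySem.Int.floordiv b 10 < PySem.Int.floordiv c 10) &&
    decide (PySem.Int.mod b 10 < PySem.Int.mod c 10)

-- ===== PORT B =====
-- B's helper: for a > 99 read the first two characters of str(a) and convert
-- each with ord(c) - 48; s[0] and s[1] are in range there (str(a) has ≥ 3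
-- characters), so the IndexError-signalling pyGet? is `some` and .getD is exact.
def lead_digits (a : Int) : Int × Int :=
  if a > 99 then
    ((((PySem.List.pyGet? (PySem.Int.toChars a) 0).getD ' ').toNat : Int) - 48,
     (((PySem.List.pyGet? (PySem.Int.toChars a) 1).getD ' ').toNat : Int) - 48)
  else (PySem.Int.floordiv a 10, PySem.Int.mod a 10)

def more_boar_alt (player_score : Int) (opponent_score : Int) : Bool :=
  match lead_digits player_score, lead_digits opponent_score with
  | (pt, pu), (ot, ou) => decide (pt < ot) && decide (pu < ou)

-- ===== PRECONDITION & SPEC =====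
def Spec_more_boar (player_score : Int) (opponent_score : Int) (out : Bool) : Prop := out = more_boar_alt player_score opponent_score
instance (player_score : Int) (opponent_score : Int) (out : Bool) : Decidable (Spec_more_boar player_score opponent_score out) := by unfold Spec_more_boar; infer_instance

-- ===== CLAIM (what is proved, stated in full; the proofs are below) =====
def Claim_equal_more_boar : Prop := ∀ (player_score : Int) (opponent_score : Int), Dom_more_boar player_score opponent_score → Spec_more_boar player_score opponent_score (more_boar player_score opponent_score)

-- ===== LEMMAS AND PROOFS =====

-- A's loop computes division by 10^(digits-2)
lemma comparison_spec : ∀ (n : Nat), 100 ≤ n →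
    comparison (n : Int) = ((n / 10 ^ (Nat.log 10 n - 1) : Nat) : Int) := by
  intro n
  induction n using Nat.strong_induction_on with
  | _ n ih =>
    intro h
    rw [comparison, if_pos (by exact_mod_cast (by omega : (99:Int) < (n:Int)))]
    rw [PySem.Int.floordiv_eq_ediv_of_pos (by norm_num : (0:Int) < 10)]
    have hdiv : (n : Int) / 10 = ((n / 10 : Nat) : Int) := by
      exact_mod_cast (Int.natCast_div n 10)
    rw [hdiv]
    by_cases h2 : 1000 ≤ n
    · rw [ih (n / 10) (by omega) (by omega)]
      have hlog : Nat.log 10 (n / 10) = Nat.log 10 n - 1 := Nat.log_div_base 10 n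
      have hpos : 2 ≤ Nat.log 10 n :=
        ((Nat.le_log_iff_pow_le (by norm_num) (by omega)).2 (by norm_num; omega))
      rw [hlog, Nat.div_div_eq_div_mul]
      congr 2
      rw [← pow_succ']
      congr 1
      omega
    · have hd : n / 10 ≤ 99 := by omega
      rw [comparison, if_neg (by exact_mod_cast (by omega : ¬ (99:Int) < ((n/10 : Nat):Int)))]
      have hlog : Nat.log 10 n = 2 :=
        Nat.log_eq_of_pow_le_of_lt_pow (by norm_num; omega) (by norm_num; omega)
      rw [hlog]
      norm_num

-- the two leading decimal digits are the first two characters of str(n)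
lemma toDigits_take2 : ∀ (n : Nat), 100 ≤ n →
    (Nat.toDigits 10 n).take 2 = Nat.toDigits 10 (n / 10 ^ (Nat.log 10 n - 1)) := by
  intro n
  induction n using Nat.strong_induction_on with
  | _ n ih =>
    intro h
    rw [Nat.toDigits_eq_if (by norm_num : (1:Nat) < 10), if_neg (by omega)]
    have hlen2 : 2 ≤ (Nat.toDigits 10 (n / 10)).length := by
      by_contra hc
      have h1 : (Nat.toDigits 10 (n / 10)).length ≤ 1 := by omega
      have := (Nat.length_toDigits_le_iff (by norm_num : (1:Nat) < 10)
        (by norm_num : (0:Nat) < 1)).1 h1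
      omega
    rw [List.take_append_of_le_length hlen2]
    by_cases h2 : 1000 ≤ n
    · rw [ih (n / 10) (by omega) (by omega)]
      have hlog : Nat.log 10 (n / 10) = Nat.log 10 n - 1 := Nat.log_div_base 10 n
      have hpos : 3 ≤ Nat.log 10 n :=
        ((Nat.le_log_iff_pow_le (by norm_num) (by omega)).2 (by norm_num; omega))
      rw [hlog, Nat.div_div_eq_div_mul]
      congr 2
      rw [← pow_succ']
      congr 1
      omega
    · have hlenle : (Nat.toDigits 10 (n / 10)).length ≤ 2 :=
        (Nat.length_toDigits_le_iff (by norm_num) (by norm_num)).2 (by omega)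
      rw [List.take_of_length_le hlenle]
      have hlog : Nat.log 10 n = 2 :=
        Nat.log_eq_of_pow_le_of_lt_pow (by norm_num; omega) (by norm_num; omega)
      rw [hlog]
      norm_num

lemma toDigits_two_digit (m : Nat) (h1 : 10 ≤ m) (h2 : m ≤ 99) :
    Nat.toDigits 10 m = [Nat.digitChar (m / 10), Nat.digitChar (m % 10)] := by
  rw [Nat.toDigits_eq_if (by norm_num : (1:Nat) < 10), if_neg (by omega),
    Nat.toDigits_of_lt_base (by omega : m / 10 < 10)]
  rfl

lemma digitChar_toNat (d : Nat) (h : d < 10) : (Nat.digitChar d).toNat = 48 + d := by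
  interval_cases d <;> rfl

-- B's digit pair equals A's reduced score split into //10 and %10
lemma lead_digits_eq (a : Int) :
    lead_digits a = (PySem.Int.floordiv (comparison a) 10, PySem.Int.mod (comparison a) 10) := by
  by_cases hgt : a > 99
  · have ha : ((a.toNat : Nat) : Int) = a := by omega
    have h100 : 100 ≤ a.toNat := by omega
    -- the reduced score m and its bounds
    set L := Nat.log 10 a.toNat with hL
    set m := a.toNat / 10 ^ (L - 1) with hm
    have hLlb : 2 ≤ L :=
      ((Nat.le_log_iff_pow_le (by norm_num) (by omega)).2 (by norm_num; omega))
    have hpowle : 10 ^ L ≤ a.toNat := Nat.pow_log_le_self 10 (by omega)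
    have hltpow : a.toNat < 10 ^ (L + 1) := Nat.lt_pow_succ_log_self (by norm_num) _
    have hm10 : 10 ≤ m := by
      rw [hm, Nat.le_div_iff_mul_le (by positivity)]
      calc 10 * 10 ^ (L - 1) = 10 ^ L := by rw [← pow_succ']; congr 1; omega
        _ ≤ a.toNat := hpowle
    have hm99 : m ≤ 99 := by
      have : a.toNat < 100 * 10 ^ (L - 1) := by
        calc a.toNat < 10 ^ (L + 1) := hltpow
          _ = 100 * 10 ^ (L - 1) := by
              rw [show L + 1 = (L - 1) + 2 by omega, pow_add]; ring
      have hub : m < 100 := by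
        rw [hm, Nat.div_lt_iff_lt_mul (by positivity)]
        exact this
      omega
    -- A's side: comparison a = m, then split
    have hcomp : comparison a = (m : Int) := by rw [← ha]; exact comparison_spec a.toNat h100
    -- B's side: the string of a starts with m's two digit characters
    have hchars : PySem.Int.toChars a = Nat.toDigits 10 a.toNat := by
      rw [PySem.Int.toChars, if_neg (by omega)]
    have htake : (Nat.toDigits 10 a.toNat).take 2
        = [Nat.digitChar (m / 10), Nat.digitChar (m % 10)] := by
      rw [toDigits_take2 a.toNat h100, ← hL, ← hm, toDigits_two_digit m hm10 hm99]
    have hget : ∀ (k : Nat), k < 2 →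
        (Nat.toDigits 10 a.toNat)[k]? = [Nat.digitChar (m / 10), Nat.digitChar (m % 10)][k]? := by
      intro k hk
      rw [← htake, List.getElem?_take_of_lt hk]
    rw [lead_digits, if_pos hgt, hchars, hcomp]
    have h0 := hget 0 (by omega)
    have h1 := hget 1 (by omega)
    simp only [List.getElem?_cons_zero, List.getElem?_cons_succ] at h0 h1
    have e0 : PySem.List.pyGet? (Nat.toDigits 10 a.toNat) 0
        = some (Nat.digitChar (m / 10)) := by
      rw [show (0 : Int) = ((0 : Nat) : Int) by norm_num, PySem.List.pyGet?_natCast, h0]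
    have e1 : PySem.List.pyGet? (Nat.toDigits 10 a.toNat) 1
        = some (Nat.digitChar (m % 10)) := by
      rw [show (1 : Int) = ((1 : Nat) : Int) by norm_num, PySem.List.pyGet?_natCast, h1]
    rw [e0, e1]
    simp only [Option.getD_some]
    rw [digitChar_toNat (m / 10) (by omega), digitChar_toNat (m % 10) (by omega)]
    rw [PySem.Int.floordiv_eq_ediv_of_pos (by norm_num : (0:Int) < 10),
      PySem.Int.mod_eq_emod_of_pos (by norm_num : (0:Int) < 10)]
    simp only [Prod.mk.injEq]
    constructor <;> push_cast <;> omega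
  · rw [lead_digits, if_neg hgt, comparison, if_neg hgt]

-- ===== VERDICT (by name: the statement is the Claim_ definition above) =====
theorem more_boar_spec : Claim_equal_more_boar := by
  intro p q _
  unfold Spec_more_boar more_boar more_boar_alt
  rw [lead_digits_eq, lead_digits_eq]
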